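-- pv_equiv track=rewrite | github.com/wenyongteng/The-Principle | pob_openrouter/data/skills/wireworld_cortex.py | step
-- ===== SOURCE A (Python) =====
-- def step(g):
--     new_g = [row[:] for row in g]
--     for y in range(len(g)):
--         for x in range(len(g[0])):
--             if g[y][x] == 0: continue
--             elif g[y][x] == 1: new_g[y][x] = 2 # Head becomes Tail
--             elif g[y][x] == 2: new_g[y][x] = 3 # Tail becomes Conductor
--             elif g[y][x] == 3:                 # Conductor becomes Head if 1 or 2 Heads adjacent
--                 heads = 0
--                 for dy in [-1,0,1]:
--                     for dx in [-1,0,1]: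
--                         if dx==0 and dy==0: continue
--                         ny, nx = y+dy, x+dx
--                         if 0<=ny<len(g) and 0<=nx<len(g[0]) and g[ny][nx]==1:
--                             heads += 1
--                 if heads == 1 or heads == 2:
--                     new_g[y][x] = 1
--     return new_g
-- ===== SOURCE B (Python) =====
-- def _tr(c, n):
--     if c == 1:
--         return 2
--     if c == 2:
--         return 3
--     if c == 3 and n in (1, 2):
--         return 1
--     return c
--
-- def step(g):
--     if not g:
--         return []
--     h, w = len(g), len(g[0])
--     counts = [[0] * w for _ in range(h)]
--     for y in range(h):
--         for x in range(w):
--             if g[y][x] == 1: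
--                 for ny in range(max(0, y - 1), min(h, y + 2)):
--                     for nx in range(max(0, x - 1), min(w, x + 2)):
--                         if (ny, nx) != (y, x):
--                             counts[ny][nx] += 1
--     return [[_tr(g[y][x], counts[y][x]) for x in range(w)] for y in range(h)]
-- ===== Notes on version B (the rewrite author's own statement) =====
-- stated objective: alternative
-- what changed: B replaces A's per-conductor gather of the 8 neighbour offsets by a scatter pass (every Head adds 1 to a zero-initialized count grid at its in-bounds neighbours) followed by a per-cell transition pass; Pre_ restricts to rectangular grids, since on ragged grids A either raises IndexError (a row shorter than row 0) or accidentally preserves trailing cells beyond the width of row 0 (an artefact of its row[:] copy).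
-- outside the precondition, e.g. on step([[1], [2, 3]]): A returns [[2], [3, 3]], B returns [[2], [3]]; on step([[], [0]]): A returns [[], [0]], B returns [[], []]
import Mathlib
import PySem

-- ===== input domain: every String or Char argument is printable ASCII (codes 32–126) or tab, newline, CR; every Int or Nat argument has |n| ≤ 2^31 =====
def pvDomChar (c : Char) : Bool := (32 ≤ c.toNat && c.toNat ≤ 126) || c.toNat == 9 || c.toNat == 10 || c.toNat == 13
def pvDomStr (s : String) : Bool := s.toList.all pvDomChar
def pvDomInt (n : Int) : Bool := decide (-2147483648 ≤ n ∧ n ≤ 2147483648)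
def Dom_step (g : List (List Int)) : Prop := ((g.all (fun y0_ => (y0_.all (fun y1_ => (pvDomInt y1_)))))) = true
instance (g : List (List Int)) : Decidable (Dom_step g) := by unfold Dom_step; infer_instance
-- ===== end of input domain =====

-- One line: B replaces A's per-conductor 8-neighbour gather by a head-scatter into a count
-- grid plus a per-cell transition pass (objective: alternative decomposition, same cost).

-- ===== PORT A =====
-- g[y][x] for an index pair A only uses when 0 ≤ y < len(g), 0 ≤ x (in range on Pre_): exact there
def pvCell (g : List (List Int)) (y x : Int) : Int :=
  (g.getD y.toNat []).getD x.toNat 0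

-- new_g[y][x] = v  (in-place update of one entry of the nested list)
def pvSet2 (m : List (List Int)) (y x : Nat) (v : Int) : List (List Int) :=
  m.set y ((m.getD y []).set x v)

-- the 'heads' counting loop of A, verbatim (dy outer, dx inner, centre skipped)
def pvHeads (g : List (List Int)) (y x : Int) : Int :=
  ([-1, 0, 1] : List Int).foldl (fun a dy =>
    ([-1, 0, 1] : List Int).foldl (fun a dx =>
      if dx = 0 ∧ dy = 0 then a
      else if 0 ≤ y + dy ∧ y + dy < (g.length : Int) ∧ 0 ≤ x + dx ∧
              x + dx < ((g.headD []).length : Int) ∧ pvCell g (y + dy) (x + dx) = 1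
      then a + 1 else a) a) 0

-- the body of A's inner 'for x' loop
def stepBodyX (g : List (List Int)) (y : Nat) (acc : List (List Int)) (x : Nat) : List (List Int) :=
  if pvCell g y x = 0 then acc
  else if pvCell g y x = 1 then pvSet2 acc y x 2
  else if pvCell g y x = 2 then pvSet2 acc y x 3
  else if pvCell g y x = 3 then
    (if pvHeads g y x = 1 ∨ pvHeads g y x = 2 then pvSet2 acc y x 1 else acc)
  else acc

def step (g : List (List Int)) : List (List Int) :=
  (List.range g.length).foldl (fun acc y =>
    (List.range (g.headD []).length).foldl (stepBodyX g y) acc) g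

-- ===== PORT B =====
-- counts[y][x] += 1
def pvInc2 (m : List (List Int)) (y x : Nat) : List (List Int) :=
  m.set y ((m.getD y []).set x (((m.getD y []).getD x 0) + 1))

-- scatter one head at (y,x): range(max(0,y-1), min(h,y+2)) is range' (y-1) (min h (y+2) - (y-1)) in ℕ
def pvScatter (h w : Nat) (cs : List (List Int)) (y x : Nat) : List (List Int) :=
  (List.range' (y - 1) (min h (y + 2) - (y - 1))).foldl (fun cs ny =>
    (List.range' (x - 1) (min w (x + 2) - (x - 1))).foldl (fun cs nx =>
      if ny = y ∧ nx = x then cs else pvInc2 cs ny nx) cs) cs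

def pvTr (c n : Int) : Int :=
  if c = 1 then 2
  else if c = 2 then 3
  else if c = 3 ∧ (n = 1 ∨ n = 2) then 1
  else c

def step_alt (g : List (List Int)) : List (List Int) :=
  match g with
  | [] => []
  | r0 :: _ =>
    let h := g.length
    let w := r0.length
    let counts := (List.range h).foldl (fun cs y =>
      (List.range w).foldl (fun cs x =>
        if (g.getD y []).getD x 0 = 1 then pvScatter h w cs y x else cs) cs)
      (List.replicate h (List.replicate w (0 : Int)))
    (List.range h).map (fun y =>
      (List.range w).map (fun x => pvTr ((g.getD y []).getD x 0) ((counts.getD y []).getD x 0)))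

-- ===== PRECONDITION & SPEC =====
-- Pre_ admits exactly the rectangular grids: on a ragged grid A either raises IndexError (a row
-- shorter than row 0) or accidentally preserves trailing cells beyond the width of row 0 — an
-- artefact of its row[:] copy that no specification would fix, so those grids are excluded.
def Pre_step (g : List (List Int)) : Prop := ∀ r ∈ g, r.length = (g.headD []).length
instance (g : List (List Int)) : Decidable (Pre_step g) := by unfold Pre_step; infer_instance

def pvWitness_step : List (List Int) := [[3, 1, 0], [0, 2, 3], [1, 0, 3]]

def Spec_step (g : List (List Int)) (out : List (List Int)) : Prop := out = step_alt g
instance (g : List (List Int)) (out : List (List Int)) : Decidable (Spec_step g out) := by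
  unfold Spec_step; infer_instance

-- ===== CLAIM (what is proved, stated in full; the proofs are below) =====
def Claim_equal_step : Prop := ∀ (g : List (List Int)), Dom_step g → Pre_step g → Spec_step g (step g)

-- ===== LEMMAS AND PROOFS =====

-- entry (Y,X) of a nested list (0 when out of range; counts/new_g rows are only read in range)
def gG (m : List (List Int)) (Y X : Nat) : Int := (m.getD Y []).getD X 0

-- the per-cell transition both programs compute
def fCell (g : List (List Int)) (y x : Nat) : Int := pvTr (gG g y x) (pvHeads g (y : Int) (x : Int))

-- indicator: cell (y,x) (Int coords) is an in-bounds Head already processed by the scatter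
-- loop when it stands at row n, column k
def TT (g : List (List Int)) (y x : Int) (n k : Nat) : Int :=
  if 0 ≤ y ∧ y < (g.length : Int) ∧ 0 ≤ x ∧ x < ((g.headD []).length : Int) ∧
     pvCell g y x = 1 ∧ (y < (n : Int) ∨ (y = (n : Int) ∧ x < (k : Int)))
  then 1 else 0

-- heads adjacent to (Y,X) among the cells processed so far
def HU (g : List (List Int)) (n k Y X : Nat) : Int :=
  TT g ((Y : Int) + -1) ((X : Int) + -1) n k + TT g ((Y : Int) + -1) (X : Int) n k +
  TT g ((Y : Int) + -1) ((X : Int) + 1) n k + TT g (Y : Int) ((X : Int) + -1) n k +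
  TT g (Y : Int) ((X : Int) + 1) n k + TT g ((Y : Int) + 1) ((X : Int) + -1) n k +
  TT g ((Y : Int) + 1) (X : Int) n k + TT g ((Y : Int) + 1) ((X : Int) + 1) n k

theorem getD_set_eq {α : Type} (l : List α) (i j : Nat) (a d : α) :
    (l.set i a).getD j d = if i = j ∧ i < l.length then a else l.getD j d := by
  by_cases h : i = j ∧ i < l.length
  · obtain ⟨rfl, hl⟩ := h
    simp [List.getD_eq_getElem?_getD, hl]
  · rw [if_neg h]
    by_cases he : i = j
    · subst he
      have hl : l.length ≤ i := by omega
      simp [List.getD_eq_getElem?_getD, hl]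
    · simp [List.getD_eq_getElem?_getD, List.getElem?_set_ne he]

theorem gG_set2 (m : List (List Int)) (y x : Nat) (v : Int) (Y X : Nat) :
    gG (pvSet2 m y x v) Y X =
      if Y = y ∧ X = x ∧ y < m.length ∧ x < (m.getD y []).length then v else gG m Y X := by
  unfold gG pvSet2
  rw [getD_set_eq]
  by_cases hy : y = Y ∧ y < m.length
  · obtain ⟨rfl, hl⟩ := hy
    rw [if_pos ⟨rfl, hl⟩, getD_set_eq]
    by_cases hx : x = X ∧ x < (m.getD y []).length
    · obtain ⟨rfl, hx⟩ := hx
      rw [if_pos ⟨rfl, hx⟩, if_pos ⟨rfl, rfl, hl, hx⟩]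
    · rw [if_neg hx, if_neg (by rintro ⟨-, rfl, -, h4⟩; exact hx ⟨rfl, h4⟩)]
  · rw [if_neg hy, if_neg (by rintro ⟨rfl, -, h3, -⟩; exact hy ⟨rfl, h3⟩)]

theorem len_set2 (m : List (List Int)) (y x : Nat) (v : Int) :
    (pvSet2 m y x v).length = m.length := by simp [pvSet2]

theorem rowlen_set2 (m : List (List Int)) (y x : Nat) (v : Int) (j : Nat) :
    ((pvSet2 m y x v).getD j []).length = (m.getD j []).length := by
  unfold pvSet2; rw [getD_set_eq]
  split_ifs with h
  · obtain ⟨rfl, _⟩ := h; simp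
  · rfl

theorem gG_inc2 (m : List (List Int)) (y x : Nat) (Y X : Nat) :
    gG (pvInc2 m y x) Y X =
      if Y = y ∧ X = x ∧ y < m.length ∧ x < (m.getD y []).length then gG m y x + 1
      else gG m Y X := by
  unfold pvInc2
  rw [show m.set y ((m.getD y []).set x (((m.getD y []).getD x 0) + 1)) =
        pvSet2 m y x (gG m y x + 1) from rfl]
  rw [gG_set2]

theorem len_inc2 (m : List (List Int)) (y x : Nat) :
    (pvInc2 m y x).length = m.length := by simp [pvInc2]

theorem rowlen_inc2 (m : List (List Int)) (y x : Nat) (j : Nat) :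
    ((pvInc2 m y x).getD j []).length = (m.getD j []).length := by
  unfold pvInc2; rw [getD_set_eq]
  split_ifs with h
  · obtain ⟨rfl, _⟩ := h; simp
  · rfl

theorem pvCell_cast (g : List (List Int)) (y x : Nat) :
    pvCell g (y : Int) (x : Int) = gG g y x := by
  simp [pvCell, gG]
theorem TT_zero (g : List (List Int)) (y x : Int) : TT g y x 0 0 = 0 := by
  unfold TT
  rw [if_neg]
  rintro ⟨h1, -, h3, -, -, h6⟩
  omega

theorem TT_full (g : List (List Int)) (y x : Int) :
    TT g y x g.length 0 =
      if 0 ≤ y ∧ y < (g.length : Int) ∧ 0 ≤ x ∧ x < ((g.headD []).length : Int) ∧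
         pvCell g y x = 1
      then 1 else 0 := by
  unfold TT
  refine if_congr ?_ rfl rfl
  constructor
  · rintro ⟨h1, h2, h3, h4, h5, -⟩; exact ⟨h1, h2, h3, h4, h5⟩
  · rintro ⟨h1, h2, h3, h4, h5⟩; exact ⟨h1, h2, h3, h4, h5, by omega⟩

theorem TT_row (g : List (List Int)) (y x : Int) (n : Nat) :
    TT g y x n (g.headD []).length = TT g y x (n + 1) 0 := by
  unfold TT
  refine if_congr ?_ rfl rfl
  constructor
  · rintro ⟨h1, h2, h3, h4, h5, h6⟩; exact ⟨h1, h2, h3, h4, h5, by omega⟩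
  · rintro ⟨h1, h2, h3, h4, h5, h6⟩; exact ⟨h1, h2, h3, h4, h5, by omega⟩

theorem TT_succ (g : List (List Int)) (n k : Nat) (hn : n < g.length)
    (hk : k < (g.headD []).length) (y x : Int) :
    TT g y x n (k + 1) =
      TT g y x n k +
        (if y = (n : Int) ∧ x = (k : Int) ∧ pvCell g (n : Int) (k : Int) = 1 then 1 else 0) := by
  by_cases hc : y = (n : Int) ∧ x = (k : Int)
  · obtain ⟨rfl, rfl⟩ := hc
    unfold TT
    by_cases hH : pvCell g (n : Int) (k : Int) = 1
    · rw [if_pos ⟨by omega, by omega, by omega, by omega, hH, by omega⟩,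
        if_neg (by rintro ⟨-, -, -, -, -, h6⟩; omega),
        if_pos ⟨rfl, rfl, hH⟩]
      norm_num
    · rw [if_neg (by rintro ⟨-, -, -, -, h5, -⟩; exact hH h5),
        if_neg (by rintro ⟨-, -, -, -, h5, -⟩; exact hH h5),
        if_neg (by rintro ⟨-, -, h3⟩; exact hH h3)]
      norm_num
  · rw [if_neg (by rintro ⟨h1, h2, -⟩; exact hc ⟨h1, h2⟩), add_zero]
    unfold TT
    refine if_congr ?_ rfl rfl
    constructor
    · rintro ⟨h1, h2, h3, h4, h5, h6⟩; exact ⟨h1, h2, h3, h4, h5, by omega⟩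
    · rintro ⟨h1, h2, h3, h4, h5, h6⟩; exact ⟨h1, h2, h3, h4, h5, by omega⟩

theorem HU_zero (g : List (List Int)) (Y X : Nat) : HU g 0 0 Y X = 0 := by
  unfold HU
  rw [TT_zero, TT_zero, TT_zero, TT_zero, TT_zero, TT_zero, TT_zero, TT_zero]
  norm_num

theorem HU_row (g : List (List Int)) (n Y X : Nat) :
    HU g n (g.headD []).length Y X = HU g (n + 1) 0 Y X := by
  unfold HU
  rw [TT_row, TT_row, TT_row, TT_row, TT_row, TT_row, TT_row, TT_row]

theorem HU_succ (g : List (List Int)) (n k Y X : Nat) (hn : n < g.length)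
    (hk : k < (g.headD []).length) (hY : Y < g.length) (hX : X < (g.headD []).length) :
    HU g n (k + 1) Y X =
      HU g n k Y X +
        (if pvCell g (n : Int) (k : Int) = 1 ∧
            (n ≤ Y + 1 ∧ Y ≤ n + 1 ∧ k ≤ X + 1 ∧ X ≤ k + 1 ∧ ¬(n = Y ∧ k = X))
         then 1 else 0) := by
  unfold HU
  rw [TT_succ g n k hn hk, TT_succ g n k hn hk, TT_succ g n k hn hk, TT_succ g n k hn hk,
    TT_succ g n k hn hk, TT_succ g n k hn hk, TT_succ g n k hn hk, TT_succ g n k hn hk]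
  have he :
      ((if (Y : Int) + -1 = (n : Int) ∧ (X : Int) + -1 = (k : Int) ∧ pvCell g (n : Int) (k : Int) = 1 then (1:Int) else 0) +
       (if (Y : Int) + -1 = (n : Int) ∧ (X : Int) = (k : Int) ∧ pvCell g (n : Int) (k : Int) = 1 then (1:Int) else 0) +
       (if (Y : Int) + -1 = (n : Int) ∧ (X : Int) + 1 = (k : Int) ∧ pvCell g (n : Int) (k : Int) = 1 then (1:Int) else 0) +
       (if (Y : Int) = (n : Int) ∧ (X : Int) + -1 = (k : Int) ∧ pvCell g (n : Int) (k : Int) = 1 then (1:Int) else 0) +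
       (if (Y : Int) = (n : Int) ∧ (X : Int) + 1 = (k : Int) ∧ pvCell g (n : Int) (k : Int) = 1 then (1:Int) else 0) +
       (if (Y : Int) + 1 = (n : Int) ∧ (X : Int) + -1 = (k : Int) ∧ pvCell g (n : Int) (k : Int) = 1 then (1:Int) else 0) +
       (if (Y : Int) + 1 = (n : Int) ∧ (X : Int) = (k : Int) ∧ pvCell g (n : Int) (k : Int) = 1 then (1:Int) else 0) +
       (if (Y : Int) + 1 = (n : Int) ∧ (X : Int) + 1 = (k : Int) ∧ pvCell g (n : Int) (k : Int) = 1 then (1:Int) else 0)) =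
      (if pvCell g (n : Int) (k : Int) = 1 ∧
            (n ≤ Y + 1 ∧ Y ≤ n + 1 ∧ k ≤ X + 1 ∧ X ≤ k + 1 ∧ ¬(n = Y ∧ k = X))
         then (1:Int) else 0) := by
    by_cases hH : pvCell g (n : Int) (k : Int) = 1
    · simp only [hH, true_and, and_true]
      split_ifs <;> omega
    · simp only [hH, false_and, and_false, if_false, false_and, if_false]
      norm_num
  rw [show ∀ a1 b1 a2 b2 a3 b3 a4 b4 a5 b5 a6 b6 a7 b7 a8 b8 : Int,
      (a1 + b1 + (a2 + b2) + (a3 + b3) + (a4 + b4) + (a5 + b5) + (a6 + b6) + (a7 + b7) + (a8 + b8)) =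
      (a1 + a2 + a3 + a4 + a5 + a6 + a7 + a8) + (b1 + b2 + b3 + b4 + b5 + b6 + b7 + b8) from
    by intros; ring]
  rw [he]
theorem foldl3 {α : Type} (f : α → Int → α) (a : α) :
    ([-1, 0, 1] : List Int).foldl f a = f (f (f a (-1)) 0) 1 := rfl

theorem foldl_row_side (P : Int → Prop) [DecidablePred P] (c : Prop) [Decidable c] (hc : ¬ c)
    (a : Int) :
    ([-1, 0, 1] : List Int).foldl (fun a dx => if dx = 0 ∧ c then a else if P dx then a + 1 else a) a
      = a + (if P (-1) then 1 else 0) + (if P 0 then 1 else 0) + (if P 1 then 1 else 0) := by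
  simp only [List.foldl, eq_false hc, and_false, if_false]
  split_ifs <;> omega

theorem foldl_row_center (P : Int → Prop) [DecidablePred P] (c : Prop) [Decidable c] (hc : c)
    (a : Int) :
    ([-1, 0, 1] : List Int).foldl (fun a dx => if dx = 0 ∧ c then a else if P dx then a + 1 else a) a
      = a + (if P (-1) then 1 else 0) + (if P 1 then 1 else 0) := by
  simp only [List.foldl, eq_true hc, and_true,
    show ((-1 : Int) = 0) ↔ False from by norm_num,
    show ((1 : Int) = 0) ↔ False from by norm_num,
    show ((0 : Int) = 0) ↔ True from by norm_num,
    if_false, if_true]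
  split_ifs <;> omega

theorem pvHeads_eq (g : List (List Int)) (Y X : Nat) :
    pvHeads g (Y : Int) (X : Int) = HU g g.length 0 Y X := by
  unfold HU
  rw [TT_full, TT_full, TT_full, TT_full, TT_full, TT_full, TT_full, TT_full]
  unfold pvHeads
  rw [foldl3]
  simp only []
  rw [foldl_row_side
      (P := fun dx => 0 ≤ (Y : Int) + -1 ∧ (Y : Int) + -1 < (g.length : Int) ∧
        0 ≤ (X : Int) + dx ∧ (X : Int) + dx < ((g.headD []).length : Int) ∧
        pvCell g ((Y : Int) + -1) ((X : Int) + dx) = 1)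
      (c := ((-1 : Int) = 0)) (by norm_num),
    foldl_row_center
      (P := fun dx => 0 ≤ (Y : Int) + 0 ∧ (Y : Int) + 0 < (g.length : Int) ∧
        0 ≤ (X : Int) + dx ∧ (X : Int) + dx < ((g.headD []).length : Int) ∧
        pvCell g ((Y : Int) + 0) ((X : Int) + dx) = 1)
      (c := True) trivial,
    foldl_row_side
      (P := fun dx => 0 ≤ (Y : Int) + 1 ∧ (Y : Int) + 1 < (g.length : Int) ∧
        0 ≤ (X : Int) + dx ∧ (X : Int) + dx < ((g.headD []).length : Int) ∧
        pvCell g ((Y : Int) + 1) ((X : Int) + dx) = 1)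
      (c := ((1 : Int) = 0)) (by norm_num)]
  simp only [Int.add_zero]
  split_ifs <;> omega

theorem scat_inner (y x ny : Nat) (l : List Nat) :
    ∀ cs : List (List Int), (∀ v ∈ l, v < (cs.getD ny []).length) → l.Nodup → ny < cs.length →
    (l.foldl (fun cs nx => if ny = y ∧ nx = x then cs else pvInc2 cs ny nx) cs).length = cs.length ∧
    (∀ j, ((l.foldl (fun cs nx => if ny = y ∧ nx = x then cs else pvInc2 cs ny nx) cs).getD j []).length
        = (cs.getD j []).length) ∧
    (∀ Y X : Nat,
      gG (l.foldl (fun cs nx => if ny = y ∧ nx = x then cs else pvInc2 cs ny nx) cs) Y X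
        = gG cs Y X + (if Y = ny ∧ X ∈ l ∧ ¬(ny = y ∧ X = x) then 1 else 0)) := by
  induction l with
  | nil =>
    intro cs _ _ _
    refine ⟨rfl, fun j => rfl, fun Y X => ?_⟩
    rw [if_neg (by rintro ⟨-, h2, -⟩; exact (List.not_mem_nil) h2)]
    simp
  | cons a t ih =>
    intro cs hb hnd hny
    rw [List.foldl_cons]
    by_cases hc : ny = y ∧ a = x
    · rw [if_pos hc]
      obtain ⟨h1, h2, h3⟩ := ih cs (fun v hv => hb v (List.mem_cons_of_mem a hv))
        hnd.of_cons hny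
      refine ⟨h1, h2, fun Y X => ?_⟩
      rw [h3 Y X]
      congr 1
      refine if_congr ?_ rfl rfl
      constructor
      · rintro ⟨hY, hmt, hP⟩
        exact ⟨hY, List.mem_cons_of_mem a hmt, hP⟩
      · rintro ⟨hY, hmem, hP⟩
        rcases List.mem_cons.1 hmem with rfl | hmt
        · exact absurd ⟨hc.1, hc.2⟩ hP
        · exact ⟨hY, hmt, hP⟩
    · rw [if_neg hc]
      have hblen : a < (cs.getD ny []).length := hb a List.mem_cons_self
      obtain ⟨h1, h2, h3⟩ := ih (pvInc2 cs ny a)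
        (fun v hv => by rw [rowlen_inc2]; exact hb v (List.mem_cons_of_mem a hv))
        hnd.of_cons (by rw [len_inc2]; exact hny)
      refine ⟨by rw [h1, len_inc2], fun j => by rw [h2, rowlen_inc2], fun Y X => ?_⟩
      rw [h3 Y X, gG_inc2]
      have hanotmem : a ∉ t := (List.nodup_cons.1 hnd).1
      by_cases hY : Y = ny
      · subst hY
        by_cases hXa : X = a
        · subst hXa
          rw [if_pos ⟨rfl, rfl, hny, hblen⟩,
            if_neg (by rintro ⟨-, hmt, -⟩; exact hanotmem hmt),
            if_pos ⟨rfl, List.mem_cons_self, fun hp => hc ⟨hp.1, hp.2⟩⟩]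
          ring
        · rw [if_neg (by rintro ⟨-, rfl, -⟩; exact hXa rfl)]
          congr 1
          refine if_congr ?_ rfl rfl
          constructor
          · rintro ⟨hY', hmt, hP⟩
            exact ⟨hY', List.mem_cons_of_mem a hmt, hP⟩
          · rintro ⟨hY', hmem, hP⟩
            rcases List.mem_cons.1 hmem with rfl | hmt
            · exact absurd rfl hXa
            · exact ⟨hY', hmt, hP⟩
      · rw [if_neg (by rintro ⟨rfl, -⟩; exact hY rfl),
          if_neg (by rintro ⟨rfl, -⟩; exact hY rfl),
          if_neg (by rintro ⟨rfl, -⟩; exact hY rfl)]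
theorem mem_scatx (w x X : Nat) (hx : x < w) (hX : X < w) :
    X ∈ List.range' (x - 1) (min w (x + 2) - (x - 1)) ↔ x ≤ X + 1 ∧ X ≤ x + 1 := by
  rw [List.mem_range'_1]
  omega

theorem scat_outer (h w y x : Nat) (hx : x < w) (l : List Nat) :
    ∀ cs : List (List Int), l.Nodup → (∀ j ∈ l, j < cs.length) →
      (∀ j ∈ l, (cs.getD j []).length = w) →
      (l.foldl (fun cs ny =>
          (List.range' (x - 1) (min w (x + 2) - (x - 1))).foldl
            (fun cs nx => if ny = y ∧ nx = x then cs else pvInc2 cs ny nx) cs) cs).length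
        = cs.length ∧
      (∀ j, ((l.foldl (fun cs ny =>
          (List.range' (x - 1) (min w (x + 2) - (x - 1))).foldl
            (fun cs nx => if ny = y ∧ nx = x then cs else pvInc2 cs ny nx) cs) cs).getD j []).length
        = (cs.getD j []).length) ∧
      (∀ Y X : Nat, X < w →
        gG (l.foldl (fun cs ny =>
            (List.range' (x - 1) (min w (x + 2) - (x - 1))).foldl
              (fun cs nx => if ny = y ∧ nx = x then cs else pvInc2 cs ny nx) cs) cs) Y X
          = gG cs Y X +
            (if Y ∈ l ∧ x ≤ X + 1 ∧ X ≤ x + 1 ∧ ¬(Y = y ∧ X = x) then 1 else 0)) := by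
  induction l with
  | nil =>
    intro cs _ _ _
    refine ⟨rfl, fun j => rfl, fun Y X _ => ?_⟩
    rw [if_neg (by rintro ⟨h1, -⟩; exact List.not_mem_nil h1)]
    simp
  | cons a t ih =>
    intro cs hnd hbl hrw
    rw [List.foldl_cons]
    have hac : a < cs.length := hbl a List.mem_cons_self
    have harow : (cs.getD a []).length = w := hrw a List.mem_cons_self
    obtain ⟨i1, i2, i3⟩ := scat_inner y x a (List.range' (x - 1) (min w (x + 2) - (x - 1))) cs
      (fun v hv => by
        rw [harow]
        have := List.mem_range'_1.1 hv
        omega)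
      List.nodup_range' hac
    obtain ⟨o1, o2, o3⟩ := ih
      ((List.range' (x - 1) (min w (x + 2) - (x - 1))).foldl
        (fun cs nx => if a = y ∧ nx = x then cs else pvInc2 cs a nx) cs)
      hnd.of_cons
      (fun j hj => by rw [i1]; exact hbl j (List.mem_cons_of_mem a hj))
      (fun j hj => by rw [i2]; exact hrw j (List.mem_cons_of_mem a hj))
    refine ⟨by rw [o1, i1], fun j => by rw [o2, i2], fun Y X hX => ?_⟩
    rw [o3 Y X hX, i3 Y X]
    have hanotmem : a ∉ t := (List.nodup_cons.1 hnd).1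
    by_cases hY : Y = a
    · subst hY
      have hiT : (if (Y ∈ t ∧ x ≤ X + 1 ∧ X ≤ x + 1 ∧ ¬(Y = y ∧ X = x)) then (1 : Int) else 0) = 0 :=
        if_neg (by rintro ⟨hmt, -⟩; exact hanotmem hmt)
      rw [hiT, add_zero]
      congr 1
      refine if_congr ?_ rfl rfl
      constructor
      · rintro ⟨-, hm, hP⟩
        obtain ⟨m1, m2⟩ := (mem_scatx w x X hx hX).1 hm
        exact ⟨List.mem_cons_self, m1, m2, hP⟩
      · rintro ⟨-, m1, m2, hP⟩
        exact ⟨rfl, (mem_scatx w x X hx hX).2 ⟨m1, m2⟩, hP⟩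
    · rw [if_neg (by rintro ⟨rfl, -⟩; exact hY rfl), add_zero]
      congr 1
      refine if_congr ?_ rfl rfl
      constructor
      · rintro ⟨hm, hrest⟩
        exact ⟨List.mem_cons_of_mem a hm, hrest⟩
      · rintro ⟨hm, hrest⟩
        rcases List.mem_cons.1 hm with rfl | hmt
        · exact absurd rfl hY
        · exact ⟨hmt, hrest⟩

theorem gG_pvScatter (h w y x : Nat) (hy : y < h) (hx : x < w) (cs : List (List Int))
    (hlen : cs.length = h) (hrow : ∀ j, j < h → (cs.getD j []).length = w) :
    (pvScatter h w cs y x).length = cs.length ∧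
    (∀ j, ((pvScatter h w cs y x).getD j []).length = (cs.getD j []).length) ∧
    (∀ Y X : Nat, Y < h → X < w →
      gG (pvScatter h w cs y x) Y X = gG cs Y X +
        (if y ≤ Y + 1 ∧ Y ≤ y + 1 ∧ x ≤ X + 1 ∧ X ≤ x + 1 ∧ ¬(y = Y ∧ x = X) then 1 else 0)) := by
  obtain ⟨o1, o2, o3⟩ := scat_outer h w y x hx (List.range' (y - 1) (min h (y + 2) - (y - 1))) cs
    List.nodup_range'
    (fun j hj => by
      rw [hlen]
      have := List.mem_range'_1.1 hj
      omega)
    (fun j hj => hrow j (by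
      have := List.mem_range'_1.1 hj
      omega))
  refine ⟨o1, o2, fun Y X hY hX => ?_⟩
  unfold pvScatter
  rw [o3 Y X hX]
  congr 1
  refine if_congr ?_ rfl rfl
  have hmem : Y ∈ List.range' (y - 1) (min h (y + 2) - (y - 1)) ↔ y ≤ Y + 1 ∧ Y ≤ y + 1 := by
    rw [List.mem_range'_1]
    omega
  rw [hmem]
  constructor
  · rintro ⟨⟨m1, m2⟩, w1, w2, hP⟩
    exact ⟨m1, m2, w1, w2, fun ⟨p, q⟩ => hP ⟨p.symm, q.symm⟩⟩
  · rintro ⟨m1, m2, w1, w2, hP⟩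
    exact ⟨⟨m1, m2⟩, w1, w2, fun ⟨p, q⟩ => hP ⟨p.symm, q.symm⟩⟩
theorem counts_inner (g : List (List Int)) (h w : Nat) (hh : h = g.length)
    (hw : w = (g.headD []).length) (n : Nat) (hn : n < h) :
    ∀ k, k ≤ w → ∀ cs : List (List Int), cs.length = h →
      (∀ j, j < h → (cs.getD j []).length = w) →
      (∀ Y X, Y < h → X < w → gG cs Y X = HU g n 0 Y X) →
      ((List.range k).foldl
          (fun cs x => if (g.getD n []).getD x 0 = 1 then pvScatter h w cs n x else cs) cs).length = h ∧
      (∀ j, j < h → (((List.range k).foldl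
          (fun cs x => if (g.getD n []).getD x 0 = 1 then pvScatter h w cs n x else cs) cs).getD j []).length = w) ∧
      (∀ Y X, Y < h → X < w → gG ((List.range k).foldl
          (fun cs x => if (g.getD n []).getD x 0 = 1 then pvScatter h w cs n x else cs) cs) Y X
        = HU g n k Y X) := by
  intro k
  induction k with
  | zero =>
    intro _ cs h1 h2 h3
    exact ⟨h1, h2, h3⟩
  | succ k ih =>
    intro hk1 cs h1 h2 h3
    have hkw : k < w := by omega
    obtain ⟨i1, i2, i3⟩ := ih (by omega) cs h1 h2 h3
    rw [List.range_succ, List.foldl_append, List.foldl_cons, List.foldl_nil]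
    set r := (List.range k).foldl
      (fun cs x => if (g.getD n []).getD x 0 = 1 then pvScatter h w cs n x else cs) cs with hr
    have hcell : (g.getD n []).getD k 0 = pvCell g (n : Int) (k : Int) := (pvCell_cast g n k).symm
    by_cases hH : pvCell g (n : Int) (k : Int) = 1
    · rw [if_pos (by rw [hcell]; exact hH)]
      obtain ⟨s1, s2, s3⟩ := gG_pvScatter h w n k hn hkw r i1 i2
      refine ⟨by rw [s1, i1], fun j hj => by rw [s2, i2 j hj], fun Y X hY hX => ?_⟩
      rw [s3 Y X hY hX, i3 Y X hY hX,
        HU_succ g n k Y X (by omega) (by omega) (by omega) (by omega)]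
      congr 1
      refine if_congr ?_ rfl rfl
      simp only [hH, true_and]
    · rw [if_neg (by rw [hcell]; exact hH)]
      refine ⟨i1, i2, fun Y X hY hX => ?_⟩
      rw [i3 Y X hY hX,
        HU_succ g n k Y X (by omega) (by omega) (by omega) (by omega),
        if_neg (by rintro ⟨p, -⟩; exact hH p), add_zero]

theorem counts_outer (g : List (List Int)) (h w : Nat) (hh : h = g.length)
    (hw : w = (g.headD []).length) :
    ∀ n, n ≤ h →
      ((List.range n).foldl
          (fun cs y => (List.range w).foldl
            (fun cs x => if (g.getD y []).getD x 0 = 1 then pvScatter h w cs y x else cs) cs)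
          (List.replicate h (List.replicate w (0 : Int)))).length = h ∧
      (∀ j, j < h → (((List.range n).foldl
          (fun cs y => (List.range w).foldl
            (fun cs x => if (g.getD y []).getD x 0 = 1 then pvScatter h w cs y x else cs) cs)
          (List.replicate h (List.replicate w (0 : Int)))).getD j []).length = w) ∧
      (∀ Y X, Y < h → X < w → gG ((List.range n).foldl
          (fun cs y => (List.range w).foldl
            (fun cs x => if (g.getD y []).getD x 0 = 1 then pvScatter h w cs y x else cs) cs)
          (List.replicate h (List.replicate w (0 : Int)))) Y X = HU g n 0 Y X) := by
  intro n
  induction n with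
  | zero =>
    intro _
    refine ⟨by simp, fun j hj => ?_, fun Y X hY hX => ?_⟩
    · simp [List.getD_eq_getElem?_getD, List.getElem?_replicate, hj]
    · rw [HU_zero]
      unfold gG
      simp [List.getD_eq_getElem?_getD, List.getElem?_replicate, hY, hX]
  | succ n ih =>
    intro hn1
    obtain ⟨i1, i2, i3⟩ := ih (by omega)
    rw [List.range_succ, List.foldl_append, List.foldl_cons, List.foldl_nil]
    obtain ⟨c1, c2, c3⟩ := counts_inner g h w hh hw n (by omega) w (le_refl w) _ i1 i2 i3
    refine ⟨c1, c2, fun Y X hY hX => ?_⟩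
    rw [c3 Y X hY hX, hw, HU_row]
theorem pre_row (g : List (List Int)) (hpre : Pre_step g) (j : Nat) (hj : j < g.length) :
    (g.getD j []).length = (g.headD []).length := by
  refine hpre _ ?_
  rw [List.getD_eq_getElem g [] hj]
  exact List.getElem_mem hj

theorem stepBodyX_gG (g : List (List Int)) (hpre : Pre_step g) (y k : Nat) (hy : y < g.length)
    (hk : k < (g.headD []).length) (r : List (List Int)) (hlen : r.length = g.length)
    (hrow : ∀ j, (r.getD j []).length = (g.getD j []).length) (hcur : gG r y k = gG g y k) :
    (stepBodyX g y r k).length = g.length ∧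
    (∀ j, ((stepBodyX g y r k).getD j []).length = (g.getD j []).length) ∧
    (∀ Y X, gG (stepBodyX g y r k) Y X = if Y = y ∧ X = k then fCell g y k else gG r Y X) := by
  have hbound : k < (r.getD y []).length := by
    rw [hrow y, pre_row g hpre y hy]
    exact hk
  have hsetlen : ∀ v : Int, (pvSet2 r y k v).length = g.length := fun v => by
    rw [len_set2, hlen]
  have hsetrow : ∀ (v : Int) (j : Nat), ((pvSet2 r y k v).getD j []).length = (g.getD j []).length :=
    fun v j => by rw [rowlen_set2, hrow]
  have hsetg : ∀ (v : Int) (Y X : Nat), gG (pvSet2 r y k v) Y X =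
      if Y = y ∧ X = k then v else gG r Y X := fun v Y X => by
    rw [gG_set2]
    refine if_congr ?_ rfl rfl
    constructor
    · rintro ⟨h1, h2, -, -⟩; exact ⟨h1, h2⟩
    · rintro ⟨h1, h2⟩; exact ⟨h1, h2, by omega, hbound⟩
  unfold stepBodyX
  rw [pvCell_cast]
  by_cases h0 : gG g y k = 0
  · rw [if_pos h0]
    refine ⟨hlen, hrow, fun Y X => ?_⟩
    split_ifs with hYX
    · obtain ⟨rfl, rfl⟩ := hYX
      rw [hcur, fCell, pvTr, h0]
      norm_num
    · rfl
  · rw [if_neg h0]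
    by_cases h1 : gG g y k = 1
    · rw [if_pos h1]
      refine ⟨hsetlen 2, hsetrow 2, fun Y X => ?_⟩
      rw [hsetg 2 Y X]
      refine if_congr Iff.rfl ?_ rfl
      rw [fCell, pvTr, h1]
      norm_num
    · rw [if_neg h1]
      by_cases h2 : gG g y k = 2
      · rw [if_pos h2]
        refine ⟨hsetlen 3, hsetrow 3, fun Y X => ?_⟩
        rw [hsetg 3 Y X]
        refine if_congr Iff.rfl ?_ rfl
        rw [fCell, pvTr, h2]
        norm_num
      · rw [if_neg h2]
        by_cases h3 : gG g y k = 3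
        · rw [if_pos h3]
          by_cases hhd : pvHeads g (y : Int) (k : Int) = 1 ∨ pvHeads g (y : Int) (k : Int) = 2
          · rw [if_pos hhd]
            refine ⟨hsetlen 1, hsetrow 1, fun Y X => ?_⟩
            rw [hsetg 1 Y X]
            refine if_congr Iff.rfl ?_ rfl
            rw [fCell, pvTr, h3]
            norm_num
            rcases hhd with hh | hh <;> simp [hh]
          · rw [if_neg hhd]
            refine ⟨hlen, hrow, fun Y X => ?_⟩
            split_ifs with hYX
            · obtain ⟨rfl, rfl⟩ := hYX
              rw [hcur, fCell, pvTr, h3]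
              norm_num
              exact ⟨fun hh => hhd (Or.inl hh), fun hh => hhd (Or.inr hh)⟩
            · rfl
        · rw [if_neg h3]
          refine ⟨hlen, hrow, fun Y X => ?_⟩
          split_ifs with hYX
          · obtain ⟨rfl, rfl⟩ := hYX
            rw [hcur, fCell, pvTr]
            rw [if_neg h1, if_neg h2, if_neg (by rintro ⟨p, -⟩; exact h3 p)]
          · rfl

theorem A_inner (g : List (List Int)) (hpre : Pre_step g) (y : Nat) (hy : y < g.length) :
    ∀ k, k ≤ (g.headD []).length → ∀ acc : List (List Int),
      acc.length = g.length → (∀ j, (acc.getD j []).length = (g.getD j []).length) →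
      (∀ X, gG acc y X = gG g y X) →
      ((List.range k).foldl (stepBodyX g y) acc).length = g.length ∧
      (∀ j, (((List.range k).foldl (stepBodyX g y) acc).getD j []).length = (g.getD j []).length) ∧
      (∀ Y X, gG ((List.range k).foldl (stepBodyX g y) acc) Y X =
        if Y = y ∧ X < k then fCell g y X else gG acc Y X) := by
  intro k
  induction k with
  | zero =>
    intro _ acc h1 h2 _
    rw [List.range_zero]
    refine ⟨h1, h2, fun Y X => ?_⟩
    rw [List.foldl_nil, if_neg (by rintro ⟨-, h⟩; omega)]
  | succ k ih =>
    intro hk1 acc h1 h2 h3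
    have hkw : k < (g.headD []).length := by omega
    obtain ⟨i1, i2, i3⟩ := ih (by omega) acc h1 h2 h3
    rw [List.range_succ, List.foldl_append, List.foldl_cons, List.foldl_nil]
    have hcur : gG ((List.range k).foldl (stepBodyX g y) acc) y k = gG g y k := by
      rw [i3 y k, if_neg (by rintro ⟨-, h⟩; omega), h3 k]
    obtain ⟨b1, b2, b3⟩ := stepBodyX_gG g hpre y k hy hkw _ i1 i2 hcur
    refine ⟨b1, b2, fun Y X => ?_⟩
    rw [b3 Y X, i3 Y X]
    by_cases hY : Y = y
    · subst hY
      by_cases hXk : X = k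
      · subst hXk
        rw [if_pos ⟨rfl, rfl⟩, if_pos ⟨rfl, by omega⟩]
      · rw [if_neg (by rintro ⟨-, h⟩; exact hXk h)]
        by_cases hXlt : X < k
        · rw [if_pos ⟨rfl, hXlt⟩, if_pos ⟨rfl, by omega⟩]
        · rw [if_neg (by rintro ⟨-, h⟩; exact hXlt h),
            if_neg (by rintro ⟨-, h⟩; omega)]
    · rw [if_neg (by rintro ⟨h, -⟩; exact hY h),
        if_neg (by rintro ⟨h, -⟩; exact hY h),
        if_neg (by rintro ⟨h, -⟩; exact hY h)]

theorem A_outer (g : List (List Int)) (hpre : Pre_step g) :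
    ∀ n, n ≤ g.length →
      ((List.range n).foldl
          (fun acc y => (List.range (g.headD []).length).foldl (stepBodyX g y) acc) g).length
        = g.length ∧
      (∀ j, (((List.range n).foldl
          (fun acc y => (List.range (g.headD []).length).foldl (stepBodyX g y) acc) g).getD j []).length
        = (g.getD j []).length) ∧
      (∀ Y X, gG ((List.range n).foldl
          (fun acc y => (List.range (g.headD []).length).foldl (stepBodyX g y) acc) g) Y X =
        if Y < n ∧ X < (g.headD []).length then fCell g Y X else gG g Y X) := by
  intro n
  induction n with
  | zero =>
    intro _
    rw [List.range_zero]
    refine ⟨rfl, fun j => rfl, fun Y X => ?_⟩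
    rw [List.foldl_nil, if_neg (by rintro ⟨h, -⟩; omega)]
  | succ n ih =>
    intro hn1
    obtain ⟨i1, i2, i3⟩ := ih (by omega)
    rw [List.range_succ, List.foldl_append, List.foldl_cons, List.foldl_nil]
    obtain ⟨a1, a2, a3⟩ := A_inner g hpre n (by omega) (g.headD []).length (le_refl _) _ i1 i2
      (fun X => by rw [i3 n X, if_neg (by rintro ⟨h, -⟩; omega)])
    refine ⟨a1, a2, fun Y X => ?_⟩
    rw [a3 Y X, i3 Y X]
    by_cases hY : Y = n
    · subst hY
      by_cases hX : X < (g.headD []).length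
      · rw [if_pos ⟨rfl, hX⟩, if_pos ⟨by omega, hX⟩]
      · rw [if_neg (by rintro ⟨-, h⟩; exact hX h),
          if_neg (by rintro ⟨-, h⟩; exact hX h),
          if_neg (by rintro ⟨-, h⟩; exact hX h)]
    · rw [if_neg (by rintro ⟨h, -⟩; exact hY h)]
      by_cases hYlt : Y < n
      · by_cases hX : X < (g.headD []).length
        · rw [if_pos ⟨hYlt, hX⟩, if_pos ⟨by omega, hX⟩]
        · rw [if_neg (by rintro ⟨-, h⟩; exact hX h),
            if_neg (by rintro ⟨-, h⟩; exact hX h)]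
      · rw [if_neg (by rintro ⟨h, -⟩; exact hYlt h),
          if_neg (by rintro ⟨h, -⟩; omega)]
theorem grid_ext (a b : List (List Int)) (h1 : a.length = b.length)
    (h2 : ∀ j, (a.getD j []).length = (b.getD j []).length)
    (h3 : ∀ Y X, gG a Y X = gG b Y X) : a = b := by
  apply List.ext_getElem h1
  intro i hi hib
  apply List.ext_getElem
  · have := h2 i
    rwa [List.getD_eq_getElem a [] hi, List.getD_eq_getElem b [] hib] at this
  · intro j hj hjb
    have := h3 i j
    unfold gG at this
    rwa [List.getD_eq_getElem a [] hi, List.getD_eq_getElem b [] hib,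
      List.getD_eq_getElem _ 0 hj, List.getD_eq_getElem _ 0 hjb] at this

def targetGrid (g : List (List Int)) : List (List Int) :=
  (List.range g.length).map (fun y =>
    (List.range (g.headD []).length).map (fun x => fCell g y x))

theorem target_len (g : List (List Int)) : (targetGrid g).length = g.length := by
  simp [targetGrid]

theorem target_rowD (g : List (List Int)) (j : Nat) (hj : j < g.length) :
    (targetGrid g).getD j [] =
      (List.range (g.headD []).length).map (fun x => fCell g j x) := by
  have hj' : j < (targetGrid g).length := by rw [target_len]; exact hj
  rw [List.getD_eq_getElem _ [] hj']
  simp [targetGrid]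

theorem target_row (g : List (List Int)) (hpre : Pre_step g) (j : Nat) :
    ((targetGrid g).getD j []).length = (g.getD j []).length := by
  by_cases hj : j < g.length
  · rw [target_rowD g j hj, pre_row g hpre j hj]
    simp
  · rw [List.getD_eq_default _ [] (by rw [target_len]; omega),
      List.getD_eq_default _ [] (by omega)]

theorem target_gG (g : List (List Int)) (hpre : Pre_step g) (Y X : Nat) :
    gG (targetGrid g) Y X =
      if Y < g.length ∧ X < (g.headD []).length then fCell g Y X else gG g Y X := by
  by_cases hY : Y < g.length
  · unfold gG
    rw [target_rowD g Y hY]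
    by_cases hX : X < (g.headD []).length
    · rw [if_pos ⟨hY, hX⟩]
      have hX' : X < ((List.range (g.headD []).length).map (fun x => fCell g Y x)).length := by
        simpa using hX
      rw [List.getD_eq_getElem _ 0 hX']
      simp
    · rw [if_neg (by rintro ⟨-, h⟩; exact hX h)]
      rw [List.getD_eq_default _ 0 (by simpa using (by omega : (g.headD []).length ≤ X)),
        List.getD_eq_default _ 0 (by rw [pre_row g hpre Y hY]; omega)]
  · rw [if_neg (by rintro ⟨h, -⟩; exact hY h)]
    unfold gG
    rw [List.getD_eq_default _ [] (by rw [target_len]; omega),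
      List.getD_eq_default _ [] (by omega)]

theorem step_eq_target (g : List (List Int)) (hpre : Pre_step g) :
    step g = targetGrid g := by
  obtain ⟨a1, a2, a3⟩ := A_outer g hpre g.length (le_refl _)
  unfold step
  apply grid_ext
  · rw [a1, target_len]
  · intro j
    rw [a2 j, target_row g hpre j]
  · intro Y X
    rw [a3 Y X, target_gG g hpre Y X]

theorem step_alt_eq_target (g : List (List Int)) : step_alt g = targetGrid g := by
  cases g with
  | nil => rfl
  | cons r0 gs =>
    obtain ⟨c1, c2, c3⟩ := counts_outer (r0 :: gs) (r0 :: gs).length r0.length rfl rfl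
      (r0 :: gs).length (le_refl _)
    simp only [step_alt]
    unfold targetGrid
    rw [show (r0 :: gs).headD [] = r0 from rfl]
    apply List.map_congr_left
    intro y hy
    have hy' : y < (r0 :: gs).length := List.mem_range.1 hy
    apply List.map_congr_left
    intro x hx
    have hx' : x < r0.length := List.mem_range.1 hx
    simp only [fCell]
    rw [pvHeads_eq (r0 :: gs) y x, ← c3 y x hy' hx']
    rfl

-- ===== VERDICT (by name: the statement is the Claim_ definition above) =====
theorem step_spec : Claim_equal_step := by
  intro g _ hpre
  show step g = step_alt g
  rw [step_eq_target g hpre, step_alt_eq_target g]
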